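-- pv_equiv track=rewrite | github.com/paulnovacovici/AdventOfCode2023 | advent_code_2023/ac_q14.py | moves_north
-- ===== SOURCE A (Python) =====
-- def moves_north(dish: list[str]):
--     moves = [[0] * len(dish[0]) for i in range(len(dish) + 1)]
--
--     for i, row in enumerate(dish):
--         for j, char in enumerate(row):
--             if char == "O":
--                 moves[i + 1][j] = moves[i][j]
--             if char == "#":
--                 moves[i + 1][j] = 0
--             if char == ".":
--                 moves[i + 1][j] = moves[i][j] + 1
--     return moves
-- ===== SOURCE B (Python) =====
-- def moves_north(dish: list[str]):
--     # Column-by-column fill with a scalar running counter instead of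
--     # row-by-row reads of the previous table row.
--     n = len(dish)
--     w = len(dish[0])
--     moves = [[0] * w for _ in range(n + 1)]
--     for j in range(w):
--         c = 0
--         for i, row in enumerate(dish):
--             ch = row[j] if j < len(row) else None
--             if ch == ".":
--                 c += 1
--             elif ch != "O":
--                 c = 0
--             moves[i + 1][j] = c
--     return moves
-- ===== Notes on version B (the rewrite author's own statement) =====
-- stated objective: alternative
-- what changed: B swaps the loop nesting: instead of A's row-by-row pass that writes each table row from reads of the previous table row, B fills the table column-by-column, threading a single scalar free-space counter down each column (reset on '#'/other/missing, incremented on '.').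
import Mathlib
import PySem

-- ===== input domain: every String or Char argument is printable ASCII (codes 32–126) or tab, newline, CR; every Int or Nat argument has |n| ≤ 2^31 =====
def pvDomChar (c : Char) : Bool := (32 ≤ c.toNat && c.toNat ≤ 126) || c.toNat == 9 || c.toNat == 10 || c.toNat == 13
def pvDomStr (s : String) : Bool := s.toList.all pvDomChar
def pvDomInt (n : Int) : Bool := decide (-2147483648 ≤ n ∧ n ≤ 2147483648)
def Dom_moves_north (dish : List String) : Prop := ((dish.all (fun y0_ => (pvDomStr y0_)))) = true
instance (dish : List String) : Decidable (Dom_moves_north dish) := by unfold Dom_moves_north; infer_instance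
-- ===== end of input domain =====

-- B fills the table column-by-column with a scalar running counter instead of A's
-- row-by-row reads of the previous table row (alternative decomposition, same cost).

-- ===== PORT A =====
-- Python `m[i][j] = v` on a list-of-lists (in range on all admitted inputs)
def pySet2 (m : List (List Int)) (i j : Nat) (v : Int) : List (List Int) :=
  m.set i ((m.getD i []).set j v)

-- Python `m[i][j]` read (in range on all admitted inputs)
def pyGet2 (m : List (List Int)) (i j : Nat) : Int :=
  (m.getD i []).getD j 0

-- inner loop of A: `for j, char in enumerate(row)` with the three sequential ifs
def mnRowA (i : Nat) : List (List Int) → Nat → List Char → List (List Int)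
  | m, _, [] => m
  | m, j, ch :: rest =>
    let m1 := if ch = 'O' then pySet2 m (i+1) j (pyGet2 m i j) else m
    let m2 := if ch = '#' then pySet2 m1 (i+1) j 0 else m1
    let m3 := if ch = '.' then pySet2 m2 (i+1) j (pyGet2 m2 i j + 1) else m2
    mnRowA i m3 (j+1) rest

-- outer loop of A: `for i, row in enumerate(dish)`
def mnRowsA : List (List Int) → Nat → List String → List (List Int)
  | m, _, [] => m
  | m, i, row :: rest => mnRowsA (mnRowA i m 0 row.toList) (i+1) rest

def moves_north (dish : List String) : List (List Int) :=
  mnRowsA (List.replicate (dish.length + 1) (List.replicate (dish.getD 0 "").length (0:Int))) 0 dish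

-- ===== PORT B =====
-- inner loop of B: walk down one column j carrying the scalar counter c
-- (`row[j] if j < len(row) else None` is exactly `row.toList[j]?`)
def mnColB (j : Nat) : List (List Int) → Nat → Int → List String → List (List Int)
  | m, _, _, [] => m
  | m, i, c, row :: rest =>
    let ch : Option Char := row.toList[j]?
    let c' : Int := if ch = some '.' then c + 1 else if ch ≠ some 'O' then 0 else c
    mnColB j (pySet2 m (i+1) j c') (i+1) c' rest

def moves_north_alt (dish : List String) : List (List Int) :=
  (List.range (dish.getD 0 "").length).foldl (fun m j => mnColB j m 0 0 dish)
    (List.replicate (dish.length + 1) (List.replicate (dish.getD 0 "").length (0:Int)))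

-- ===== PRECONDITION & SPEC =====
-- Pre_ excludes exactly the inputs on which A raises: the empty list (dish[0] is an
-- IndexError) and ragged inputs where some row carries an 'O', '#' or '.' at a column
-- index ≥ len(dish[0]) (A then indexes a table row out of range).
def Pre_moves_north (dish : List String) : Prop :=
  dish ≠ [] ∧ (dish.all (fun s => (s.toList.drop (dish.getD 0 "").length).all
    (fun c => !(c == 'O' || c == '#' || c == '.')))) = true
instance (dish : List String) : Decidable (Pre_moves_north dish) := by
  unfold Pre_moves_north; infer_instance

def pvWitness_moves_north : List String := ["O.", "#."]

def Spec_moves_north (dish : List String) (out : List (List Int)) : Prop := out = moves_north_alt dish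
instance (dish : List String) (out : List (List Int)) : Decidable (Spec_moves_north dish out) := by unfold Spec_moves_north; infer_instance

-- ===== CLAIM (what is proved, stated in full; the proofs are below) =====
def Claim_equal_moves_north : Prop := ∀ (dish : List String), Dom_moves_north dish → Pre_moves_north dish → Spec_moves_north dish (moves_north dish)

-- ===== LEMMAS AND PROOFS =====

-- the per-cell transition: counter above, current character (none = missing)
def mnStep (c : Int) (ch : Option Char) : Int :=
  if ch = some '.' then c + 1 else if ch = some 'O' then c else 0

-- spec: free-space count for column j after i rows
def mnColval (dish : List String) (j : Nat) : Nat → Int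
  | 0 => 0
  | i+1 => mnStep (mnColval dish j i) ((dish.getD i "").toList[j]?)

theorem length_pySet2 (m : List (List Int)) (i j : Nat) (v : Int) :
    (pySet2 m i j v).length = m.length := by
  simp [pySet2]

theorem mem_pySet2_length {m : List (List Int)} {w : Nat}
    (hw : ∀ r ∈ m, r.length = w) (i j : Nat) (v : Int) :
    ∀ r ∈ pySet2 m i j v, r.length = w := by
  intro r hr
  by_cases hi : i < m.length
  · rcases List.mem_or_eq_of_mem_set hr with h | h
    · exact hw r h
    · subst h
      rw [List.length_set, List.getD_eq_getElem?_getD, List.getElem?_eq_getElem hi]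
      exact hw _ (List.getElem_mem hi)
  · rw [pySet2, List.set_eq_of_length_le (le_of_not_gt hi)] at hr
    exact hw r hr

theorem pyGet2_pySet2_same {m : List (List Int)} {w i j : Nat}
    (hi : i < m.length) (hw : ∀ r ∈ m, r.length = w) (hj : j < w) (v : Int) :
    pyGet2 (pySet2 m i j v) i j = v := by
  have hlen : m[i].length = w := hw _ (List.getElem_mem hi)
  simp [pySet2, pyGet2, List.getD_eq_getElem?_getD, List.getElem?_eq_getElem hi,
    List.getElem?_set_self (show j < (m[i]).length from hlen ▸ hj),
    List.getElem?_set_self (show i < m.length from hi)]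

theorem pyGet2_pySet2_ne {i j a b : Nat} (m : List (List Int)) (v : Int)
    (h : a ≠ i ∨ b ≠ j) :
    pyGet2 (pySet2 m i j v) a b = pyGet2 m a b := by
  by_cases ha : a = i
  · rcases h with h | h
    · exact absurd ha h
    · subst ha
      by_cases hi : a < m.length
      · simp [pySet2, pyGet2, List.getD_eq_getElem?_getD,
          List.getElem?_set_self hi, List.getElem?_eq_getElem hi,
          List.getElem?_set_ne (Ne.symm h)]
      · rw [pySet2, List.set_eq_of_length_le (le_of_not_gt hi)]
  · simp [pySet2, pyGet2, List.getD_eq_getElem?_getD, List.getElem?_set_ne (Ne.symm ha)]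

theorem mnRowA_shape {w : Nat} (i : Nat) :
    ∀ (cs : List Char) (j0 : Nat) (m : List (List Int)),
      (∀ r ∈ m, r.length = w) →
      (mnRowA i m j0 cs).length = m.length ∧ ∀ r ∈ mnRowA i m j0 cs, r.length = w := by
  intro cs
  induction cs with
  | nil => intro j0 m hw; exact ⟨rfl, hw⟩
  | cons ch rest ih =>
    intro j0 m hw
    simp only [mnRowA]
    have s1 : ∀ (m' : List (List Int)), (∀ r ∈ m', r.length = w) →
        ∀ (c : Char) (v : Int), (∀ r ∈ (if ch = c then pySet2 m' (i+1) j0 v else m'), r.length = w) ∧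
          (if ch = c then pySet2 m' (i+1) j0 v else m').length = m'.length := by
      intro m' hw' c v
      split
      · exact ⟨mem_pySet2_length hw' _ _ _, length_pySet2 _ _ _ _⟩
      · exact ⟨hw', rfl⟩
    obtain ⟨h1, e1⟩ := s1 m hw 'O' (pyGet2 m i j0)
    obtain ⟨h2, e2⟩ := s1 _ h1 '#' 0
    obtain ⟨h3, e3⟩ := s1 _ h2 '.' (pyGet2 _ i j0 + 1)
    obtain ⟨hl, hr⟩ := ih (j0+1) _ h3
    exact ⟨by rw [hl, e3, e2, e1], hr⟩

theorem mnColB_shape {w : Nat} (j : Nat) :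
    ∀ (rows : List String) (i0 : Nat) (c : Int) (m : List (List Int)),
      (∀ r ∈ m, r.length = w) →
      (mnColB j m i0 c rows).length = m.length ∧ ∀ r ∈ mnColB j m i0 c rows, r.length = w := by
  intro rows
  induction rows with
  | nil => intro i0 c m hw; exact ⟨rfl, hw⟩
  | cons row rest ih =>
    intro i0 c m hw
    simp only [mnColB]
    obtain ⟨hl, hr⟩ := ih (i0+1) _ _ (mem_pySet2_length hw _ _ _)
    exact ⟨by rw [hl, length_pySet2], hr⟩

-- pointwise effect of A's inner loop
theorem mnRowA_get {n w : Nat} (i : Nat) (hi : i < n) :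
    ∀ (cs : List Char) (j0 : Nat) (m : List (List Int)),
      m.length = n + 1 → (∀ r ∈ m, r.length = w) →
      (∀ p (hp : p < cs.length), w ≤ j0 + p → cs[p] ≠ 'O' ∧ cs[p] ≠ '#' ∧ cs[p] ≠ '.') →
      (∀ b, j0 ≤ b → pyGet2 m (i+1) b = 0) →
      ∀ a b, pyGet2 (mnRowA i m j0 cs) a b =
        if a = i + 1 ∧ j0 ≤ b ∧ b < w then mnStep (pyGet2 m i b) cs[b - j0]? else pyGet2 m a b := by
  intro cs
  induction cs with
  | nil =>
    intro j0 m hm hw hns hz a b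
    simp only [mnRowA]
    split
    · next h => rw [h.1, hz b h.2.1]; simp [mnStep]
    · rfl
  | cons ch rest ih =>
    intro j0 m hm hw hns hz a b
    simp only [mnRowA]
    set m3 := (fun m2 => if ch = '.' then pySet2 m2 (i+1) j0 (pyGet2 m2 i j0 + 1) else m2)
        ((fun m1 => if ch = '#' then pySet2 m1 (i+1) j0 0 else m1)
        (if ch = 'O' then pySet2 m (i+1) j0 (pyGet2 m i j0) else m)) with hm3
    have hne : ∀ a' b', a' ≠ i + 1 ∨ b' ≠ j0 → pyGet2 m3 a' b' = pyGet2 m a' b' := by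
      intro a' b' h
      simp only [hm3]
      split <;> split <;> split <;>
        simp only [pyGet2_pySet2_ne _ _ h]
    have hrow_i : ∀ b', pyGet2 m3 i b' = pyGet2 m i b' := fun b' => hne i b' (Or.inl (by omega))
    have hm3len : m3.length = n + 1 := by
      simp only [hm3]
      split <;> split <;> split <;> simp [length_pySet2, hm]
    have hm3w : ∀ r ∈ m3, r.length = w := by
      simp only [hm3]
      split <;> split <;> split <;>
        first
        | exact mem_pySet2_length (mem_pySet2_length (mem_pySet2_length hw _ _ _) _ _ _) _ _ _
        | exact mem_pySet2_length (mem_pySet2_length hw _ _ _) _ _ _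
        | exact mem_pySet2_length hw _ _ _
        | exact hw
    have hi1 : i + 1 < m.length := by omega
    have hcell : pyGet2 m3 (i+1) j0 =
        if j0 < w then mnStep (pyGet2 m i j0) (some ch) else pyGet2 m (i+1) j0 := by
      by_cases hjw : j0 < w
      · simp only [hm3]
        by_cases hO : ch = 'O'
        · subst hO
          rw [if_pos (rfl : ('O':Char) = 'O'), if_neg (show ¬('O':Char) = '#' by decide),
            if_neg (show ¬('O':Char) = '.' by decide), pyGet2_pySet2_same hi1 hw hjw, if_pos hjw]
          simp [mnStep]
        · by_cases hH : ch = '#'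
          · subst hH
            rw [if_neg (show ¬('#':Char) = 'O' by decide), if_pos (rfl : ('#':Char) = '#'),
              if_neg (show ¬('#':Char) = '.' by decide), pyGet2_pySet2_same hi1 hw hjw, if_pos hjw]
            simp [mnStep]
          · by_cases hD : ch = '.'
            · subst hD
              rw [if_neg (show ¬('.':Char) = 'O' by decide), if_neg (show ¬('.':Char) = '#' by decide),
                if_pos (rfl : ('.':Char) = '.'), pyGet2_pySet2_same hi1 hw hjw, if_pos hjw]
              simp [mnStep]
            · rw [if_neg hO, if_neg hH, if_neg hD, hz j0 le_rfl, if_pos hjw]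
              simp only [mnStep]
              rw [if_neg (show ¬(some ch = some '.') by simpa using hD),
                if_neg (show ¬(some ch = some 'O') by simpa using hO)]
      · obtain ⟨hO, hH, hD⟩ := hns 0 (by simp) (by omega)
        simp only [List.getElem_cons_zero] at hO hH hD
        rw [if_neg hjw]
        simp only [hm3]
        rw [if_neg hO, if_neg hH, if_neg hD]
    have hz3 : ∀ b', j0 + 1 ≤ b' → pyGet2 m3 (i+1) b' = 0 := by
      intro b' hb'
      rw [hne _ _ (Or.inr (by omega))]
      exact hz b' (by omega)
    have hns3 : ∀ p (hp : p < rest.length), w ≤ (j0+1) + p →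
        rest[p] ≠ 'O' ∧ rest[p] ≠ '#' ∧ rest[p] ≠ '.' := by
      intro p hp hwp
      have := hns (p+1) (by simpa using Nat.succ_lt_succ hp) (by omega)
      simpa using this
    rw [ih (j0+1) m3 hm3len hm3w hns3 hz3 a b]
    by_cases ha : a = i + 1
    · subst ha
      by_cases hb0 : b = j0
      · have hno : ¬ (i + 1 = i + 1 ∧ j0 + 1 ≤ b ∧ b < w) := by omega
        rw [if_neg hno, hb0, hcell]
        by_cases hjw : j0 < w
        · simp [hjw]
        · simp [hjw]
      · by_cases hble : j0 + 1 ≤ b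
        · have hbj : j0 ≤ b := by omega
          by_cases hbw : b < w
          · rw [if_pos ⟨rfl, hble, hbw⟩, if_pos ⟨rfl, hbj, hbw⟩, hrow_i]
            congr 1
            have he : b - j0 = (b - (j0+1)) + 1 := by omega
            simp [he]
          · rw [if_neg (by omega), if_neg (by omega)]
            exact hne _ _ (Or.inr hb0)
        · rw [if_neg (by omega), if_neg (by omega)]
          exact hne _ _ (Or.inr hb0)
    · rw [if_neg (by omega), if_neg (by omega)]
      exact hne a b (Or.inl ha)

-- pointwise effect of A's outer loop
theorem mnRowsA_get {dish : List String} {w : Nat}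
    (hpre : ∀ s ∈ dish, ∀ c ∈ s.toList.drop w, c ≠ 'O' ∧ c ≠ '#' ∧ c ≠ '.') :
    ∀ (rows : List String) (i0 : Nat) (m : List (List Int)),
      rows = dish.drop i0 → i0 ≤ dish.length →
      m.length = dish.length + 1 → (∀ r ∈ m, r.length = w) →
      (∀ a b, pyGet2 m a b = if a ≤ i0 ∧ b < w then mnColval dish b a else 0) →
      ∀ a b, pyGet2 (mnRowsA m i0 rows) a b =
        if a ≤ dish.length ∧ b < w then mnColval dish b a else 0 := by
  intro rows
  induction rows with
  | nil =>
    intro i0 m hdrop hle hm hw hH a b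
    have hi0 : dish.length ≤ i0 := by
      have := List.drop_eq_nil_iff.mp hdrop.symm
      omega
    have : i0 = dish.length := by omega
    subst this
    exact hH a b
  | cons row rest ih =>
    intro i0 m hdrop hle hm hw hH a b
    have hi0lt : i0 < dish.length := by
      by_contra h
      rw [List.drop_eq_nil_iff.mpr (by omega)] at hdrop
      exact absurd hdrop (by simp)
    have hrow? : dish[i0]? = some row := by
      have h0 : (dish.drop i0)[0]? = some row := by rw [← hdrop]; rfl
      rw [List.getElem?_drop] at h0
      simpa using h0
    have hrowD : dish.getD i0 "" = row := by
      rw [List.getD_eq_getElem?_getD, hrow?]; rfl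
    have hrowmem : row ∈ dish := by
      have : row ∈ dish.drop i0 := by rw [← hdrop]; exact List.mem_cons_self
      exact List.mem_of_mem_drop this
    have hrest : rest = dish.drop (i0 + 1) := by
      have := congrArg List.tail hdrop
      simpa [List.tail_drop] using this
    have hns : ∀ p (hp : p < row.toList.length), w ≤ 0 + p →
        row.toList[p] ≠ 'O' ∧ row.toList[p] ≠ '#' ∧ row.toList[p] ≠ '.' := by
      intro p hp hwp
      apply hpre row hrowmem
      have hplen : p - w < (row.toList.drop w).length := by
        rw [List.length_drop]; omega
      have : (row.toList.drop w)[p - w] = row.toList[p] := by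
        rw [List.getElem_drop]; congr 1; omega
      rw [← this]
      exact List.getElem_mem hplen
    have hz : ∀ b', (0:Nat) ≤ b' → pyGet2 m (i0+1) b' = 0 := by
      intro b' _
      rw [hH (i0+1) b', if_neg (by omega)]
    have hA := mnRowA_get (n := dish.length) (w := w) i0 hi0lt row.toList 0 m hm hw hns hz
    obtain ⟨hl', hw'⟩ := mnRowA_shape (w := w) i0 row.toList 0 m hw
    simp only [mnRowsA]
    apply ih (i0+1) _ hrest (by omega) (by rw [hl', hm]) hw'
    intro a' b'
    rw [hA a' b']
    by_cases ha' : a' = i0 + 1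
    · subst ha'
      by_cases hb' : b' < w
      · rw [if_pos ⟨rfl, Nat.zero_le _, hb'⟩, if_pos ⟨le_rfl, hb'⟩]
        rw [hH i0 b', if_pos ⟨le_rfl, hb'⟩]
        show mnStep (mnColval dish b' i0) row.toList[b' - 0]? = mnColval dish b' (i0 + 1)
        rw [mnColval, hrowD]
        simp
      · rw [if_neg (by omega), hH _ _, if_neg (by omega), if_neg (by omega)]
    · rw [if_neg (by omega), hH a' b']
      by_cases hb' : b' < w
      · by_cases haa : a' ≤ i0
        · rw [if_pos ⟨haa, hb'⟩, if_pos ⟨by omega, hb'⟩]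
        · rw [if_neg (by omega), if_neg (by omega)]
      · rw [if_neg (by omega), if_neg (by omega)]

-- B's counter update is the spec transition
theorem bstep_eq (c : Int) (ch : Option Char) :
    (if ch = some '.' then c + 1 else if ch ≠ some 'O' then 0 else c) = mnStep c ch := by
  rw [mnStep]
  split
  · rfl
  · by_cases h : ch = some 'O' <;> simp [h]

-- pointwise effect of B's inner loop (one column)
theorem mnColB_get {dish : List String} {w : Nat} {j : Nat} (hj : j < w) :
    ∀ (rows : List String) (i0 : Nat) (c : Int) (m : List (List Int)),
      rows = dish.drop i0 →
      m.length = dish.length + 1 → (∀ r ∈ m, r.length = w) →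
      c = mnColval dish j i0 →
      ∀ a b, pyGet2 (mnColB j m i0 c rows) a b =
        if b = j ∧ i0 < a ∧ a ≤ dish.length then mnColval dish j a else pyGet2 m a b := by
  intro rows
  induction rows with
  | nil =>
    intro i0 c m hdrop hm hw hc a b
    have hi0 : dish.length ≤ i0 := by
      have := List.drop_eq_nil_iff.mp hdrop.symm
      omega
    simp only [mnColB]
    rw [if_neg (by omega)]
  | cons row rest ih =>
    intro i0 c m hdrop hm hw hc a b
    have hi0lt : i0 < dish.length := by
      by_contra h
      rw [List.drop_eq_nil_iff.mpr (by omega)] at hdrop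
      exact absurd hdrop (by simp)
    have hrow? : dish[i0]? = some row := by
      have h0 : (dish.drop i0)[0]? = some row := by rw [← hdrop]; rfl
      rw [List.getElem?_drop] at h0
      simpa using h0
    have hrowD : dish.getD i0 "" = row := by
      rw [List.getD_eq_getElem?_getD, hrow?]; rfl
    have hrest : rest = dish.drop (i0 + 1) := by
      have := congrArg List.tail hdrop
      simpa [List.tail_drop] using this
    simp only [mnColB]
    rw [bstep_eq]
    have hc' : mnStep c row.toList[j]? = mnColval dish j (i0 + 1) := by
      rw [hc, mnColval, hrowD]
    rw [hc']
    have hm' := mem_pySet2_length hw (i0+1) j (mnColval dish j (i0+1))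
    rw [ih (i0+1) _ _ hrest (by rw [length_pySet2, hm]) hm' rfl a b]
    by_cases hcond : b = j ∧ i0 + 1 < a ∧ a ≤ dish.length
    · rw [if_pos hcond, if_pos ⟨hcond.1, by omega, hcond.2.2⟩]
    · rw [if_neg hcond]
      by_cases hcell : a = i0 + 1 ∧ b = j
      · obtain ⟨ha, hb⟩ := hcell
        subst ha; subst hb
        rw [if_pos ⟨rfl, by omega, by omega⟩]
        exact pyGet2_pySet2_same (by omega) hw hj _
      · rw [if_neg (by omega), pyGet2_pySet2_ne m _ (by tauto)]

-- pointwise effect of B's outer loop over a set of columns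
theorem mnColsB_get {dish : List String} {w : Nat} :
    ∀ (js : List Nat), (∀ j ∈ js, j < w) →
      ∀ (m : List (List Int)),
      m.length = dish.length + 1 → (∀ r ∈ m, r.length = w) →
      ∀ a b, pyGet2 (js.foldl (fun m j => mnColB j m 0 0 dish) m) a b =
        if b ∈ js ∧ 0 < a ∧ a ≤ dish.length then mnColval dish b a else pyGet2 m a b := by
  intro js
  induction js with
  | nil => intro _ m _ _ a b; simp
  | cons j js' ih =>
    intro hall m hm hw a b
    simp only [List.foldl_cons]
    have hj : j < w := hall j List.mem_cons_self
    have hB := mnColB_get (dish := dish) hj dish 0 0 m rfl hm hw (by rw [mnColval])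
    obtain ⟨hl', hw'⟩ := mnColB_shape (w := w) j dish 0 0 m hw
    rw [ih (fun x hx => hall x (List.mem_cons_of_mem _ hx)) _ (by rw [hl', hm]) hw' a b]
    by_cases h1 : b ∈ js' ∧ 0 < a ∧ a ≤ dish.length
    · rw [if_pos h1, if_pos ⟨List.mem_cons_of_mem _ h1.1, h1.2⟩]
    · rw [if_neg h1, hB a b]
      by_cases h2 : b = j ∧ 0 < a ∧ a ≤ dish.length
      · rw [if_pos h2, h2.1, if_pos ⟨List.mem_cons_self, h2.2⟩]
      · rw [if_neg h2, if_neg (by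
          intro ⟨hmem, hrest⟩
          rcases List.mem_cons.mp hmem with h | h
          · exact h2 ⟨h, hrest⟩
          · exact h1 ⟨h, hrest⟩)]

theorem init_get (k w : Nat) (a b : Nat) :
    pyGet2 (List.replicate k (List.replicate w (0:Int))) a b = 0 := by
  by_cases h : a < k
  · by_cases hb : b < w <;>
      simp [pyGet2, List.getD_eq_getElem?_getD, h, hb]
  · simp [pyGet2, List.getD_eq_getElem?_getD, h]

theorem init_shape (k w : Nat) :
    (List.replicate k (List.replicate w (0:Int))).length = k ∧
    ∀ r ∈ List.replicate k (List.replicate w (0:Int)), r.length = w := by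
  constructor
  · simp
  · intro r hr
    rw [List.eq_of_mem_replicate hr]
    simp

theorem table_ext {m1 m2 : List (List Int)} {n w : Nat}
    (h1l : m1.length = n) (h2l : m2.length = n)
    (h1w : ∀ r ∈ m1, r.length = w) (h2w : ∀ r ∈ m2, r.length = w)
    (h : ∀ a b, pyGet2 m1 a b = pyGet2 m2 a b) : m1 = m2 := by
  apply List.ext_getElem (by omega)
  intro a ha1 ha2
  apply List.ext_getElem (by rw [h1w _ (List.getElem_mem ha1), h2w _ (List.getElem_mem ha2)])
  intro b hb1 hb2
  have := h a b
  simp only [pyGet2, List.getD_eq_getElem?_getD, List.getElem?_eq_getElem ha1,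
    List.getElem?_eq_getElem ha2, List.getElem?_eq_getElem hb1,
    List.getElem?_eq_getElem hb2, Option.getD_some] at this
  exact this

theorem mnColval_zero_at_zero (dish : List String) (b : Nat) : mnColval dish b 0 = 0 := by
  rw [mnColval]

theorem mnRowsA_shape {w : Nat} :
    ∀ (rows : List String) (i0 : Nat) (m : List (List Int)),
      (∀ r ∈ m, r.length = w) →
      (mnRowsA m i0 rows).length = m.length ∧ ∀ r ∈ mnRowsA m i0 rows, r.length = w := by
  intro rows
  induction rows with
  | nil => exact fun i0 m hw => ⟨rfl, hw⟩
  | cons row rest ih =>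
    intro i0 m hw
    simp only [mnRowsA]
    obtain ⟨hl, hr⟩ := mnRowA_shape (w := w) i0 row.toList 0 m hw
    obtain ⟨hl2, hr2⟩ := ih (i0+1) _ hr
    exact ⟨by rw [hl2, hl], hr2⟩

theorem mnColsB_shape (dish : List String) {w : Nat} :
    ∀ (js : List Nat) (m : List (List Int)),
      (∀ r ∈ m, r.length = w) →
      (js.foldl (fun m j => mnColB j m 0 0 dish) m).length = m.length ∧
        ∀ r ∈ js.foldl (fun m j => mnColB j m 0 0 dish) m, r.length = w := by
  intro js
  induction js with
  | nil => exact fun m hw => ⟨rfl, hw⟩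
  | cons j js' ih =>
    intro m hw
    simp only [List.foldl_cons]
    obtain ⟨hl, hr⟩ := mnColB_shape (w := w) j dish 0 0 m hw
    obtain ⟨hl2, hr2⟩ := ih _ hr
    exact ⟨by rw [hl2, hl], hr2⟩

-- ===== VERDICT (by name: the statement is the Claim_ definition above) =====
theorem moves_north_spec : Claim_equal_moves_north := by
  intro dish _ hpre
  obtain ⟨hne, hallb⟩ := hpre
  have hall : ∀ s ∈ dish, ∀ c ∈ s.toList.drop (dish.getD 0 "").length,
      c ≠ 'O' ∧ c ≠ '#' ∧ c ≠ '.' := by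
    intro s hs c hc
    have h1 := List.all_eq_true.mp (List.all_eq_true.mp hallb s hs) c hc
    simp at h1
    tauto
  unfold Spec_moves_north moves_north moves_north_alt
  obtain ⟨hil, hiw⟩ := init_shape (dish.length + 1) (dish.getD 0 "").length
  have hInit : ∀ a b, pyGet2 (List.replicate (dish.length + 1)
      (List.replicate (dish.getD 0 "").length (0:Int))) a b =
      if a ≤ 0 ∧ b < (dish.getD 0 "").length then mnColval dish b a else 0 := by
    intro a b
    rw [init_get]
    by_cases h : a ≤ 0 ∧ b < (dish.getD 0 "").length
    · rw [if_pos h]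
      have ha : a = 0 := by omega
      rw [ha, mnColval_zero_at_zero]
    · rw [if_neg h]
  have hA := mnRowsA_get hall dish 0 _ (by simp) (Nat.zero_le _) hil hiw hInit
  have hB := mnColsB_get (dish := dish) (List.range (dish.getD 0 "").length)
    (fun j hj => List.mem_range.mp hj) _ hil hiw
  obtain ⟨hAl, hAw⟩ := mnRowsA_shape dish 0 _ hiw
  obtain ⟨hBl, hBw⟩ := mnColsB_shape dish (List.range (dish.getD 0 "").length) _ hiw
  apply table_ext (n := dish.length + 1) (w := (dish.getD 0 "").length)
    (by rw [hAl, hil]) (by rw [hBl, hil]) hAw hBw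
  intro a b
  rw [hA a b, hB a b, init_get]
  by_cases hb : b < (dish.getD 0 "").length
  · by_cases ha : a ≤ dish.length
    · by_cases h0 : a = 0
      · rw [if_pos ⟨ha, hb⟩, if_neg (by omega), h0, mnColval_zero_at_zero]
      · rw [if_pos ⟨ha, hb⟩, if_pos ⟨List.mem_range.mpr hb, by omega, ha⟩]
    · rw [if_neg (by omega), if_neg (by omega)]
  · rw [if_neg (by omega), if_neg (fun hc => hb (List.mem_range.mp hc.1))]
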